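-- pv_equiv track=rewrite | github.com/aasthashrimal/Exoplanet-Detector | exoplanet_detector.py | feature_descriptions
-- ===== SOURCE A (Python) =====
-- def feature_descriptions(all_features):
--     """Provides a brief description for each column."""
--     descs = {}
--     for f in all_features:
--         key = f.lower()
--
--         d = ""
--         if 'err' in key: d = "Error/Uncertainty for this measurement."
--         elif 'toi' in key or 'koi' in key: d = "Kepler/TESS Object of Interest Identifier."
--         elif any(tok in key for tok in ("rade", "radius", "rad", "prad", "srad")): d = "Radius (planetary or stellar)."
--         elif any(tok in key for tok in ("period", "orbper")): d = "Orbital period (days)."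
--         elif any(tok in key for tok in ("depth", "trandep")): d = "Transit depth (fractional flux loss)."
--         elif any(tok in key for tok in ("dur", "duration")): d = "Transit duration (hours)."
--         elif any(tok in key for tok in ("teff", "temp")): d = "Stellar effective temperature ($\text{K}$)."
--         elif 'logg' in key: d = "Stellar surface gravity ($\text{log g}$)."
--         elif any(tok in key for tok in ("mag", "tmag", "vmag")): d = "Apparent magnitude."
--         elif any(tok in key for tok in ("mass", "smass", "masse")): d = "Mass (planetary or stellar)."
--         elif 'dist' in key: d = "Distance (parsecs)."
--         elif 'flag' in key or 'missing' in key or 'is_' in key: d = "Binary flag (0 or 1)."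
--         elif any(tok in key for tok in ("rastr", "decstr")): d = "Internal one-hot encoded coordinate flag (0 or 1)."
--         else: d = "General measurement or derived property."
--
--         descs[f] = d
--     return descs
-- ===== SOURCE B (Python) =====
-- _RULES = [
--     (('err',), "Error/Uncertainty for this measurement."),
--     (('toi', 'koi'), "Kepler/TESS Object of Interest Identifier."),
--     (('rade', 'radius', 'rad', 'prad', 'srad'), "Radius (planetary or stellar)."),
--     (('period', 'orbper'), "Orbital period (days)."),
--     (('depth', 'trandep'), "Transit depth (fractional flux loss)."),
--     (('dur', 'duration'), "Transit duration (hours)."),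
--     (('teff', 'temp'), "Stellar effective temperature ($\text{K}$)."),
--     (('logg',), "Stellar surface gravity ($\text{log g}$)."),
--     (('mag', 'tmag', 'vmag'), "Apparent magnitude."),
--     (('mass', 'smass', 'masse'), "Mass (planetary or stellar)."),
--     (('dist',), "Distance (parsecs)."),
--     (('flag', 'missing', 'is_'), "Binary flag (0 or 1)."),
--     (('rastr', 'decstr'), "Internal one-hot encoded coordinate flag (0 or 1)."),
-- ]
-- _DEFAULT = "General measurement or derived property."
--
--
-- def feature_descriptions(all_features):
--     """Provides a brief description for each column."""
--     # Rule-major staged overwrite: seed every feature with the default, then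
--     # sweep the rules from lowest to highest priority, each pass overwriting
--     # the description of every matching feature; the highest-priority matching
--     # rule wins because its pass runs last.
--     descs = {f: _DEFAULT for f in all_features}
--     keys = list(descs)
--     for tokens, desc in reversed(_RULES):
--         for f in keys:
--             if any(tok in f.lower() for tok in tokens):
--                 descs[f] = desc
--     return descs
-- ===== Notes on version B (the rewrite author's own statement) =====
-- stated objective: alternative
-- what changed: Replaced the per-feature first-match if/elif cascade by a rule-major staged sweep: every feature is seeded with the default, then the rules table is swept lowest-priority-first, each pass overwriting matching features so the highest-priority match wins by being written last.
import Mathlib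
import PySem

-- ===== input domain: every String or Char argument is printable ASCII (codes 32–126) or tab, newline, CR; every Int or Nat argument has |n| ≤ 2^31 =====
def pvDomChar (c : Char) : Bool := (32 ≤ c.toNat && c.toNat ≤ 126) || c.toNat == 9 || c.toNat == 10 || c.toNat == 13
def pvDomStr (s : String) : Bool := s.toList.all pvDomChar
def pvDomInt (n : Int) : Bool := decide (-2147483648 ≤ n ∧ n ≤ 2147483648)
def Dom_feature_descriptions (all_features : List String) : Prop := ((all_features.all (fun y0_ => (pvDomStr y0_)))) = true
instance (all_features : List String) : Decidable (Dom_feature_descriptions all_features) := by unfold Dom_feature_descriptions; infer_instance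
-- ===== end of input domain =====

-- B replaces A's per-feature 14-branch if/elif cascade by a rule-major staged sweep (default first, then lowest-priority rules first, each pass overwriting matching features); same cost, different traversal.

-- ===== PORT A =====
-- A's per-feature if/elif cascade, step for step ('tok in key' = PySem.Str.isIn tok key).
def pvCascade (key : String) : String :=
  if PySem.Str.isIn "err" key then "Error/Uncertainty for this measurement."
  else if PySem.Str.isIn "toi" key || PySem.Str.isIn "koi" key then "Kepler/TESS Object of Interest Identifier."
  else if ["rade", "radius", "rad", "prad", "srad"].any (fun tok => PySem.Str.isIn tok key) then "Radius (planetary or stellar)."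
  else if ["period", "orbper"].any (fun tok => PySem.Str.isIn tok key) then "Orbital period (days)."
  else if ["depth", "trandep"].any (fun tok => PySem.Str.isIn tok key) then "Transit depth (fractional flux loss)."
  else if ["dur", "duration"].any (fun tok => PySem.Str.isIn tok key) then "Transit duration (hours)."
  else if ["teff", "temp"].any (fun tok => PySem.Str.isIn tok key) then "Stellar effective temperature ($\text{K}$)."
  else if PySem.Str.isIn "logg" key then "Stellar surface gravity ($\text{log g}$)."
  else if ["mag", "tmag", "vmag"].any (fun tok => PySem.Str.isIn tok key) then "Apparent magnitude."
  else if ["mass", "smass", "masse"].any (fun tok => PySem.Str.isIn tok key) then "Mass (planetary or stellar)."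
  else if PySem.Str.isIn "dist" key then "Distance (parsecs)."
  else if PySem.Str.isIn "flag" key || PySem.Str.isIn "missing" key || PySem.Str.isIn "is_" key then "Binary flag (0 or 1)."
  else if ["rastr", "decstr"].any (fun tok => PySem.Str.isIn tok key) then "Internal one-hot encoded coordinate flag (0 or 1)."
  else "General measurement or derived property."

def feature_descriptions (all_features : List String) : List (String × String) :=
  (all_features.foldl (fun descs f => PySem.Dict.insert descs f (pvCascade (PySem.Str.lower f))) PySem.Dict.empty).items

-- ===== PORT B =====
def pvRules : List (List String × String) :=
  [ (["err"], "Error/Uncertainty for this measurement."),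
    (["toi", "koi"], "Kepler/TESS Object of Interest Identifier."),
    (["rade", "radius", "rad", "prad", "srad"], "Radius (planetary or stellar)."),
    (["period", "orbper"], "Orbital period (days)."),
    (["depth", "trandep"], "Transit depth (fractional flux loss)."),
    (["dur", "duration"], "Transit duration (hours)."),
    (["teff", "temp"], "Stellar effective temperature ($\text{K}$)."),
    (["logg"], "Stellar surface gravity ($\text{log g}$)."),
    (["mag", "tmag", "vmag"], "Apparent magnitude."),
    (["mass", "smass", "masse"], "Mass (planetary or stellar)."),
    (["dist"], "Distance (parsecs)."),
    (["flag", "missing", "is_"], "Binary flag (0 or 1)."),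
    (["rastr", "decstr"], "Internal one-hot encoded coordinate flag (0 or 1).") ]

def pvDefault : String := "General measurement or derived property."

-- 'any(tok in f.lower() for tok in tokens)'
def pvMatch (r : List String × String) (f : String) : Bool :=
  r.1.any (fun tok => PySem.Str.isIn tok (PySem.Str.lower f))

-- Source B: seed all features with the default, snapshot the keys, then sweep reversed(_RULES), each pass overwriting matching keys.
def feature_descriptions_alt (all_features : List String) : List (String × String) :=
  let descs0 := all_features.foldl (fun d f => PySem.Dict.insert d f pvDefault) PySem.Dict.empty
  let ks := descs0.keys
  (pvRules.reverse.foldl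
      (fun d r => ks.foldl (fun d f => if pvMatch r f then PySem.Dict.insert d f r.2 else d) d)
      descs0).items

-- ===== PRECONDITION & SPEC =====
def Spec_feature_descriptions (all_features : List String) (out : List (String × String)) : Prop := out = feature_descriptions_alt all_features
instance (all_features : List String) (out : List (String × String)) : Decidable (Spec_feature_descriptions all_features out) := by unfold Spec_feature_descriptions; infer_instance

-- ===== CLAIM =====
def Claim_equal_feature_descriptions : Prop := ∀ (all_features : List String), Dom_feature_descriptions all_features → Spec_feature_descriptions all_features (feature_descriptions all_features)

-- ===== LEMMAS AND PROOFS =====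

-- First-match over a rules list, at an already-lowercased key: the value both programs compute per feature.
def firstMatch (key : String) : List (List String × String) → String
  | [] => pvDefault
  | r :: rest => if r.1.any (fun tok => PySem.Str.isIn tok key) then r.2 else firstMatch key rest

set_option maxHeartbeats 1000000 in
theorem cascade_eq_firstMatch (key : String) :
    pvCascade key = firstMatch key pvRules := by
  simp only [pvCascade, pvRules, firstMatch, pvDefault, List.any_cons, List.any_nil,
    Bool.or_false, Bool.or_assoc]

-- B's per-key staged value: sweeping the reversed rules with last-write-wins equals first-match.
theorem revSweep_eq_firstMatch (f : String) (rules : List (List String × String)) :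
    rules.reverse.foldl (fun acc r => if pvMatch r f then r.2 else acc) pvDefault
      = firstMatch (PySem.Str.lower f) rules := by
  rw [List.foldl_reverse]
  induction rules with
  | nil => rfl
  | cons r rest ih =>
    simp only [List.foldr_cons]
    rw [ih]
    rfl

-- Every value in A's dict is the cascade of its (lowered) key.
theorem values_A (xs : List String) (d : PySem.Dict String String)
    (h : ∀ p ∈ d.items, p.2 = pvCascade (PySem.Str.lower p.1)) :
    ∀ p ∈ (xs.foldl (fun d f => PySem.Dict.insert d f (pvCascade (PySem.Str.lower f))) d).items,
      p.2 = pvCascade (PySem.Str.lower p.1) := by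
  induction xs generalizing d with
  | nil => exact h
  | cons x xs ih =>
    refine ih _ (fun p hp => ?_)
    rcases (PySem.Dict.mem_items_insert _ _ _ _).1 hp with h1 | h1
    · subst h1; rfl
    · exact h p h1.1

-- Every value in B's seed dict is the default.
theorem values_seed (xs : List String) (d : PySem.Dict String String)
    (h : ∀ p ∈ d.items, p.2 = pvDefault) :
    ∀ p ∈ (xs.foldl (fun d f => PySem.Dict.insert d f pvDefault) d).items, p.2 = pvDefault := by
  induction xs generalizing d with
  | nil => exact h
  | cons x xs ih =>
    refine ih _ (fun p hp => ?_)
    rcases (PySem.Dict.mem_items_insert _ _ _ _).1 hp with h1 | h1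
    · subst h1; rfl
    · exact h p h1.1

-- A dict whose values are v of their keys has items = keys.map (k, v k).
theorem items_eq_keys_map (d : PySem.Dict String String) (v : String → String)
    (h : ∀ p ∈ d.items, p.2 = v p.1) :
    d.items = d.keys.map (fun k => (k, v k)) := by
  simp only [PySem.Dict.keys, List.map_map]
  symm
  refine (List.map_congr_left (fun p hp => ?_)).trans (List.map_id _)
  simp only [Function.comp_apply, id]
  obtain ⟨a, b⟩ := p
  simpa using (h _ hp).symm

-- The inner pass preserves 'contains'.
theorem contains_inner (m : String → Bool) (v : String) (ks : List String)
    (d : PySem.Dict String String) (k : String) (h : d.contains k = true) :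
    (ks.foldl (fun d f => if m f then PySem.Dict.insert d f v else d) d).contains k = true := by
  induction ks generalizing d with
  | nil => exact h
  | cons x xs ih =>
    refine ih _ ?_
    by_cases hm : m x
    · simp only [hm, if_true, PySem.Dict.contains_insert, h, Bool.or_true]
    · simpa [hm] using h

-- One inner pass, over keys all contained in d, maps each item pointwise.
theorem items_inner (m : String → Bool) (v : String) (ks : List String) :
    ∀ d : PySem.Dict String String, (∀ k ∈ ks, d.contains k = true) →
    (ks.foldl (fun d f => if m f then PySem.Dict.insert d f v else d) d).items
      = d.items.map (fun p => if decide (p.1 ∈ ks) && m p.1 then (p.1, v) else p) := by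
  induction ks with
  | nil =>
    intro d _
    rw [List.foldl_nil]
    exact ((List.map_congr_left (fun p _ => by simp)).trans (List.map_id _)).symm
  | cons x xs ih =>
    intro d hd
    simp only [List.foldl_cons]
    by_cases hm : m x
    · have hc : d.contains x = true := hd x (List.mem_cons_self ..)
      have hrec := ih (PySem.Dict.insert d x v)
        (fun k hk => by
          simp only [PySem.Dict.contains_insert, hd k (List.mem_cons_of_mem _ hk), Bool.or_true])
      rw [if_pos hm, hrec, PySem.Dict.items_insert_of_contains _ _ hc, List.map_map]
      refine List.map_congr_left (fun p _ => ?_)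
      simp only [Function.comp_apply]
      by_cases hpx : p.1 = x
      · subst hpx
        simp [hm]
      · have : (p.1 == x) = false := by simp [hpx]
        simp only [this, Bool.false_eq_true, if_false]
        by_cases hmem : p.1 ∈ xs
        · simp [hmem, hpx]
        · simp [hmem, hpx]
    · rw [if_neg hm, ih d (fun k hk => hd k (List.mem_cons_of_mem _ hk))]
      refine List.map_congr_left (fun p _ => ?_)
      by_cases hpx : p.1 = x
      · subst hpx; simp [hm]
      · by_cases hmem : p.1 ∈ xs
        · simp [hmem, hpx]
        · simp [hmem, hpx]

-- A pass step on a pair with its key in ks, iterated over the rules, keeps the key and folds the value.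
theorem pair_fold (ks : List String) (rs : List (List String × String)) (k : String) (v : String)
    (hk : k ∈ ks) :
    rs.foldl (fun (q : String × String) r => if decide (q.1 ∈ ks) && pvMatch r q.1 then (q.1, r.2) else q) (k, v)
      = (k, rs.foldl (fun acc r => if pvMatch r k then r.2 else acc) v) := by
  induction rs generalizing v with
  | nil => rfl
  | cons r rest ih =>
    simp only [List.foldl_cons, hk, decide_true, Bool.true_and]
    by_cases hm : pvMatch r k
    · simp only [hm, if_true]; exact ih r.2
    · simp only [hm, Bool.false_eq_true, if_false]; exact ih v

-- The whole rule sweep: items become the per-pair fold of the passes.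
theorem items_sweep (ks : List String) (rs : List (List String × String)) :
    ∀ d : PySem.Dict String String, (∀ k ∈ ks, d.contains k = true) →
    (rs.foldl
        (fun d r => ks.foldl (fun d f => if pvMatch r f then PySem.Dict.insert d f r.2 else d) d)
        d).items
      = d.items.map (fun p =>
          rs.foldl (fun (q : String × String) r => if decide (q.1 ∈ ks) && pvMatch r q.1 then (q.1, r.2) else q) p) := by
  induction rs with
  | nil => intro d _; simp
  | cons r rest ih =>
    intro d hd
    simp only [List.foldl_cons]
    have hd' : ∀ k ∈ ks, (ks.foldl (fun d f => if pvMatch r f then PySem.Dict.insert d f r.2 else d) d).contains k = true :=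
      fun k hk => contains_inner _ _ _ _ _ (hd k hk)
    rw [ih _ hd', items_inner (fun f => pvMatch r f) r.2 ks d hd, List.map_map]
    refine List.map_congr_left (fun p _ => ?_)
    simp only [Function.comp_apply]

-- ===== VERDICT (by name: the statement is the Claim_ definition above) =====
theorem feature_descriptions_spec : Claim_equal_feature_descriptions := by
  intro xs _
  unfold Spec_feature_descriptions feature_descriptions feature_descriptions_alt
  set dA := xs.foldl (fun d f => PySem.Dict.insert d f (pvCascade (PySem.Str.lower f))) PySem.Dict.empty with hdA
  set d0 := xs.foldl (fun d f => PySem.Dict.insert d f pvDefault) PySem.Dict.empty with hd0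
  have hkeys : dA.keys = d0.keys := by
    rw [hdA, hd0, PySem.Dict.keys_foldl_insert, PySem.Dict.keys_foldl_insert]
  have hcont : ∀ k ∈ d0.keys, d0.contains k = true := by
    intro k hk; exact (PySem.Dict.contains_iff_mem_keys _ _).2 hk
  have hA : dA.items = dA.keys.map (fun k => (k, pvCascade (PySem.Str.lower k))) :=
    items_eq_keys_map _ _ (values_A xs PySem.Dict.empty (by
      intro p hp; simp [PySem.Dict.empty] at hp))
  have h0 : d0.items = d0.keys.map (fun k => (k, pvDefault)) :=
    items_eq_keys_map _ _ (values_seed xs PySem.Dict.empty (by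
      intro p hp; simp [PySem.Dict.empty] at hp))
  rw [items_sweep d0.keys pvRules.reverse d0 hcont, hA, hkeys, h0, List.map_map]
  refine List.map_congr_left (fun k hk => ?_)
  simp only [Function.comp_apply]
  rw [pair_fold d0.keys pvRules.reverse k pvDefault hk, revSweep_eq_firstMatch,
    cascade_eq_firstMatch]
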